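-- pv_equiv track=rewrite | github.com/qingchenyouforcc/neuroSangSpider | src/i18n/loader.py | _process_multiline_value
-- ===== SOURCE A (Python) =====
-- def _process_multiline_value(value: str) -> str:
--     """处理多行值，将续行连接为单行"""
--     # 将换行符后跟空格的模式替换为空格，实现多行连接
--     # 但保留显式的 \n 转义符
--     lines = value.split("\n")
--     processed_lines = []
--
--     for i, line in enumerate(lines):
--         stripped_line = line.strip()
--         # 如果行以反斜杠结束，表示续行
--         if stripped_line.endswith("\\") and i < len(lines) - 1:
--             # 移除反斜杠，但不移除行尾空格（除非是转义空格）
--             processed_line = stripped_line[:-1].rstrip()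
--             processed_lines.append(processed_line)
--         else:
--             processed_lines.append(stripped_line)
--             if i < len(lines) - 1:  # 不是最后一行，添加换行符
--                 processed_lines.append("\n")
--
--     result = "".join(processed_lines)
--     # 移除末尾的多余换行符
--     return result.rstrip("\n")
-- ===== SOURCE B (Python) =====
-- def _process_multiline_value(value: str) -> str:
--     """Join continuation lines: build logical segments back-to-front, then '\n'-join."""
--     lines = value.split("\n")
--     n = len(lines)
--     segments = []
--     for j in range(n - 1, -1, -1):
--         s = lines[j].strip()
--         if s.endswith("\\") and j < n - 1:
--             # continuation: glue onto the segment that starts at the next line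
--             segments[0] = s[:-1].rstrip() + segments[0]
--         else:
--             segments.insert(0, s)
--     return "\n".join(segments).rstrip("\n")
-- ===== Notes on version B (the rewrite author's own statement) =====
-- stated objective: alternative
-- what changed: A emits a flat token list (stripped lines interleaved with explicit newline tokens) and joins it with the empty separator; B builds the logical segments back-to-front with a reversed loop that glues each continuation line onto the segment below it, then joins the segments with the newline separator.
import Mathlib
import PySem

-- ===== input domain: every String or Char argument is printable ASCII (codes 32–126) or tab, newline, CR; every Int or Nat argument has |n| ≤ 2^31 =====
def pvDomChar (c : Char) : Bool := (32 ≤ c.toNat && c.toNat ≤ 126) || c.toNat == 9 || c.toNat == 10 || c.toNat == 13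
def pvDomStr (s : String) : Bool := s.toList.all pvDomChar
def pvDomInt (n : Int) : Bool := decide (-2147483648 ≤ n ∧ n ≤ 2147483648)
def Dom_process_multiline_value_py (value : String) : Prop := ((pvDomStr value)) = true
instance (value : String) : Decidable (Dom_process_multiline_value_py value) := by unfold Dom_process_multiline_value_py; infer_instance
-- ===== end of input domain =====

-- B builds the logical segments back-to-front (a reversed loop gluing a continuation onto the
-- following segment) and '\n'-joins them, instead of A's flat token list with explicit "\n" tokens.

-- result.rstrip("\n"): drop trailing '\n' characters (hand port, exact: rstrip with an
-- explicit character set removes exactly the trailing characters in that set)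
def pvRstripNl (s : String) : String := String.ofList ((s.toList.reverse.dropWhile (· == '\n')).reverse)

-- ===== PORT A =====
-- the for-loop over enumerate(lines), appending to processed_lines; i is the index, n = len(lines)
def pvAGo (n : Nat) : List String → Nat → List String → List String
  | [], _, acc => acc
  | line :: rest, i, acc =>
      let stripped := PySem.Str.strip line
      if PySem.Str.endswith stripped "\\" && decide (i < n - 1) then
        pvAGo n rest (i + 1)
          (acc ++ [PySem.Str.rstrip (PySem.Str.slice stripped none (some (-1)))])
      else
        pvAGo n rest (i + 1)
          (acc ++ [stripped] ++ (if decide (i < n - 1) then ["\n"] else []))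

def process_multiline_value_py (value : String) : String :=
  let lines := (PySem.Str.split? value "\n").getD []   -- sep "\n" ≠ "": split? is always some
  let processed := pvAGo lines.length lines 0 []
  pvRstripNl (PySem.Str.join "" processed)

-- ===== PORT B =====
-- the reversed loop of Source B (j from n-1 down to 0) as a right fold: at line :: rest the loop has
-- already produced the segments of rest; 'j < n - 1' is 'rest ≠ []'
def pvSegs : List String → List String
  | [] => []
  | line :: rest =>
      let s := PySem.Str.strip line
      let segs := pvSegs rest
      if PySem.Str.endswith s "\\" && !rest.isEmpty then
        match segs with
        | h :: t => (PySem.Str.rstrip (PySem.Str.slice s none (some (-1))) ++ h) :: t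
        | [] => []   -- unreachable: rest ≠ [] gives pvSegs rest ≠ []
      else s :: segs

def process_multiline_value_py_alt (value : String) : String :=
  let lines := (PySem.Str.split? value "\n").getD []
  pvRstripNl (PySem.Str.join "\n" (pvSegs lines))

-- ===== PRECONDITION & SPEC =====
def Spec_process_multiline_value_py (value : String) (out : String) : Prop := out = process_multiline_value_py_alt value
instance (value : String) (out : String) : Decidable (Spec_process_multiline_value_py value out) := by unfold Spec_process_multiline_value_py; infer_instance

-- ===== CLAIM (what is proved, stated in full; the proofs are below) =====
def Claim_equal_process_multiline_value_py : Prop := ∀ (value : String), Dom_process_multiline_value_py value → Spec_process_multiline_value_py value (process_multiline_value_py value)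

-- ===== LEMMAS AND PROOFS =====

-- A's token list, recursively (the 'i < n - 1' test becomes 'rest ≠ []')
def pvTokA : List String → List String
  | [] => []
  | line :: rest =>
      let s := PySem.Str.strip line
      (if PySem.Str.endswith s "\\" && !rest.isEmpty then
        [PySem.Str.rstrip (PySem.Str.slice s none (some (-1)))]
      else s :: (if rest.isEmpty then [] else ["\n"])) ++ pvTokA rest

lemma pvAGo_eq_tokA (ls : List String) (i : Nat) (n : Nat) (h : i + ls.length = n)
    (acc : List String) : pvAGo n ls i acc = acc ++ pvTokA ls := by
  induction ls generalizing i acc with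
  | nil => simp [pvAGo, pvTokA]
  | cons l rest ih =>
      have hlt : (decide (i < n - 1)) = !rest.isEmpty := by
        cases rest <;> simp_all <;> omega
      simp only [pvAGo, pvTokA, hlt]
      by_cases hc : PySem.Str.endswith (PySem.Str.strip l) "\\" && !rest.isEmpty
      · rw [if_pos hc, if_pos hc, ih (i + 1) (by simp at h ⊢; omega)]
        simp
      · rw [if_neg hc, if_neg hc, ih (i + 1) (by simp at h ⊢; omega)]
        cases rest <;> simp

-- one-step unfoldings of the two recursions (definitional)
lemma pvTokA_cons (l : String) (rest : List String) :
    pvTokA (l :: rest) =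
      (if PySem.Str.endswith (PySem.Str.strip l) "\\" && !rest.isEmpty then
        [PySem.Str.rstrip (PySem.Str.slice (PySem.Str.strip l) none (some (-1)))]
      else PySem.Str.strip l :: (if rest.isEmpty then [] else ["\n"])) ++ pvTokA rest := rfl

lemma pvSegs_cons (l : String) (rest : List String) :
    pvSegs (l :: rest) =
      if PySem.Str.endswith (PySem.Str.strip l) "\\" && !rest.isEmpty then
        match pvSegs rest with
        | h :: t => (PySem.Str.rstrip (PySem.Str.slice (PySem.Str.strip l) none (some (-1))) ++ h) :: t
        | [] => []
      else PySem.Str.strip l :: pvSegs rest := rfl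

lemma pvSegs_ne_nil (r : List String) : ∀ l, pvSegs (l :: r) ≠ [] := by
  induction r with
  | nil => intro l; simp [pvSegs]
  | cons a b ih =>
      intro l
      rcases h : pvSegs (a :: b) with _ | ⟨h1, t1⟩
      · exact absurd h (ih a)
      · rw [pvSegs_cons, h]
        split <;> simp

-- "".join of a token list peels one token
lemma pvJoin_empty_cons (x : List Char) (xs : List (List Char)) :
    PySem.Chars.join [] (x :: xs) = x ++ PySem.Chars.join [] xs := by
  cases xs with
  | nil => simp [PySem.Chars.join_singleton, PySem.Chars.join_nil]
  | cons y t => rw [PySem.Chars.join_cons_cons]; simp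

-- a glued-on prefix of the first part moves out of a join
lemma pvJoin_glue (sep x y : List Char) (t : List (List Char)) :
    PySem.Chars.join sep ((x ++ y) :: t) = x ++ PySem.Chars.join sep (y :: t) := by
  cases t with
  | nil => simp [PySem.Chars.join_singleton]
  | cons z t' => rw [PySem.Chars.join_cons_cons, PySem.Chars.join_cons_cons]; simp

-- the heart: A's "".join over its token list equals B's "\n".join over the segments
lemma pvJoin_tokA_eq_segs (ls : List String) :
    PySem.Chars.join [] ((pvTokA ls).map String.toList) =
    PySem.Chars.join ['\n'] ((pvSegs ls).map String.toList) := by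
  induction ls with
  | nil => simp [pvTokA, pvSegs, PySem.Chars.join_nil]
  | cons l rest ih =>
      cases rest with
      | nil =>
          simp [pvTokA, pvSegs, PySem.Chars.join_singleton]
      | cons a b =>
          rcases hseg : pvSegs (a :: b) with _ | ⟨h1, t1⟩
          · exact absurd hseg (pvSegs_ne_nil b a)
          · rw [pvTokA_cons, pvSegs_cons, hseg]
            simp only [List.isEmpty_cons, Bool.not_false, Bool.and_true]
            by_cases hc : PySem.Str.endswith (PySem.Str.strip l) "\\" = true
            · rw [if_pos hc, if_pos hc]
              simp only [List.singleton_append, List.map_cons, String.toList_append]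
              rw [pvJoin_empty_cons, pvJoin_glue, ← List.map_cons, ← hseg, ih]
            · rw [if_neg hc, if_neg hc]
              simp only [Bool.false_eq_true, if_false, List.cons_append, List.nil_append,
                List.map_cons]
              rw [pvJoin_empty_cons, pvJoin_empty_cons, PySem.Chars.join_cons_cons,
                ← List.map_cons, ← hseg]
              have hnl : ("\n" : String).toList = ['\n'] := rfl
              rw [hnl, ih]
              simp [List.append_assoc]

-- ===== VERDICT (by name: the statement is the Claim_ definition above) =====
theorem process_multiline_value_py_spec : Claim_equal_process_multiline_value_py := by
  intro value _
  unfold Spec_process_multiline_value_py process_multiline_value_py process_multiline_value_py_alt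
  dsimp only
  rw [pvAGo_eq_tokA _ 0 _ (by omega), List.nil_append]
  unfold pvRstripNl
  rw [PySem.Str.toList_join, PySem.Str.toList_join]
  have h0 : ("" : String).toList = ([] : List Char) := rfl
  have hnl : ("\n" : String).toList = ['\n'] := rfl
  rw [h0, hnl, pvJoin_tokA_eq_segs]
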